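-- pv_equiv track=rewrite | github.com/EdgarRomero290/CodeWars | Mountain Bike Trail(Not Ready).py | draw_trail
-- ===== SOURCE A (Python) =====
-- from itertools import accumulate
-- from itertools import accumulate
--
-- def draw_trail(trail):
--     trail = [*accumulate(trail)]
--     max_h = max(trail) // 3
--     drawing = [[' '] * (len(trail)+1) for _ in range(max_h+3-min(trail)//3)]
--     for t, height in enumerate(trail):
--         for y0, x0 in ((max_h, 1), (max_h+2, 0)):
--             drawing[y0-height//3][x0+t] = '_-‾'[height%3]
--     return '\n'.join(map(''.join, drawing))
-- ===== SOURCE B (Python) =====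
-- from itertools import accumulate
--
-- def draw_trail(trail):
--     heights = list(accumulate(trail))
--     max_h = max(heights) // 3
--     rows = max_h + 3 - min(heights) // 3
--     n = len(heights)
--
--     def cell(r, c):
--         if c < n and r == max_h + 2 - heights[c] // 3:
--             return '_-‾'[heights[c] % 3]
--         if c >= 1 and r == max_h - heights[c - 1] // 3:
--             return '_-‾'[heights[c - 1] % 3]
--         return ' '
--
--     return '\n'.join(
--         ''.join(cell(r, c) for c in range(n + 1)) for r in range(rows)
--     )
-- ===== Notes on version B (the rewrite author's own statement) =====
-- stated objective: alternative
-- what changed: B replaces A's element-major mutation of a dense character grid (two cell assignments per trail point) by a closed per-cell formula evaluated in a single row-major rendering pass, with the overwrite order resolved statically (the column-t mark wins over the previous point's column-t mark); Pre_ excludes only the empty list, on which both A's and B's max() raise ValueError.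
import Mathlib
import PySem

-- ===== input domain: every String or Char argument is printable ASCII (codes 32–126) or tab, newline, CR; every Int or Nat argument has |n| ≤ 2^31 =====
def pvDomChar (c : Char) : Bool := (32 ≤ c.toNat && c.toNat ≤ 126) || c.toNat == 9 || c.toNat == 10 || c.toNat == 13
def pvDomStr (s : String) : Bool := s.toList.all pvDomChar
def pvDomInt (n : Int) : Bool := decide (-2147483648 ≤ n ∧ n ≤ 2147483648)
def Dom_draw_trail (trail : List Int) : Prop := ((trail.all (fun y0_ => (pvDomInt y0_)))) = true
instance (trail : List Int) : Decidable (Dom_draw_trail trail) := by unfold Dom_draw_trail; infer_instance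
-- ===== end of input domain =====

-- B renders the picture cell-by-cell from a closed per-cell formula (row-major), instead of A's
-- index-wise mutation of a dense grid; objective: alternative (same asymptotic cost).

-- shared helpers: both Pythons compute [*accumulate(trail)] and the character '_-‾'[h%3]
def pvCumsum (acc : Int) : List Int → List Int
  | [] => []
  | d :: ds => (acc + d) :: pvCumsum (acc + d) ds

def pvMark (h : Int) : Char :=
  (PySem.Str.pyGet? "_-‾" (PySem.Int.mod h 3)).getD ' '

-- ===== PORT A =====
-- drawing[y][x] = ch ; the indices occurring on Pre_ are nonnegative and in range, where pySetD/pyGetD are exact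
def pvSet2 (g : List (List Char)) (y x : Int) (ch : Char) : List (List Char) :=
  PySem.List.pySetD g y (PySem.List.pySetD (PySem.List.pyGetD g y []) x ch)

def draw_trail (trail : List Int) : String :=
  let tr := pvCumsum 0 trail
  let maxH := PySem.Int.floordiv ((PySem.List.max? tr (fun x => x)).getD 0) 3
  let drawing0 := List.replicate
      (maxH + 3 - PySem.Int.floordiv ((PySem.List.min? tr (fun x => x)).getD 0) 3).toNat
      (List.replicate (tr.length + 1) ' ')
  -- the inner loop 'for y0, x0 in ((max_h,1),(max_h+2,0))' unrolled into its two assignments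
  let drawing := (PySem.List.enumerate tr 0).foldl
    (fun g p =>
      pvSet2 (pvSet2 g (maxH - PySem.Int.floordiv p.2 3) (1 + p.1) (pvMark p.2))
        (maxH + 2 - PySem.Int.floordiv p.2 3) (0 + p.1) (pvMark p.2)) drawing0
  PySem.Str.join "\n" (drawing.map (fun row => String.mk row))

-- ===== PORT B =====
def pvCell (hs : List Int) (maxH : Int) (n : Int) (r c : Int) : Char :=
  if c < n ∧ r = maxH + 2 - PySem.Int.floordiv (PySem.List.pyGetD hs c 0) 3 then
    pvMark (PySem.List.pyGetD hs c 0)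
  else if 1 ≤ c ∧ r = maxH - PySem.Int.floordiv (PySem.List.pyGetD hs (c - 1) 0) 3 then
    pvMark (PySem.List.pyGetD hs (c - 1) 0)
  else ' '

def draw_trail_alt (trail : List Int) : String :=
  let hs := pvCumsum 0 trail
  let maxH := PySem.Int.floordiv ((PySem.List.max? hs (fun x => x)).getD 0) 3
  let rows := maxH + 3 - PySem.Int.floordiv ((PySem.List.min? hs (fun x => x)).getD 0) 3
  let n : Int := hs.length
  PySem.Str.join "\n" ((PySem.List.pyRange 0 rows 1).map (fun r =>
    String.mk ((PySem.List.pyRange 0 (n + 1) 1).map (fun c => pvCell hs maxH n r c))))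

-- ===== PRECONDITION & SPEC =====
-- Pre_ excludes only the empty list, on which A's max() raises ValueError (B raises there too).
def Pre_draw_trail (trail : List Int) : Prop := trail ≠ []
instance (trail : List Int) : Decidable (Pre_draw_trail trail) := by unfold Pre_draw_trail; infer_instance
def pvWitness_draw_trail : List Int := ([1, -2, 3])

def Spec_draw_trail (trail : List Int) (out : String) : Prop := out = draw_trail_alt trail
instance (trail : List Int) (out : String) : Decidable (Spec_draw_trail trail out) := by unfold Spec_draw_trail; infer_instance

-- ===== CLAIM (what is proved, stated in full; the proofs are below) =====
def Claim_equal_draw_trail : Prop := ∀ (trail : List Int), Dom_draw_trail trail → Pre_draw_trail trail → Spec_draw_trail trail (draw_trail trail)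

-- ===== LEMMAS AND PROOFS =====

-- the grid as a function of (row, col)
def pvGridOf (R C : Nat) (f : Nat → Nat → Char) : List (List Char) :=
  (List.range R).map (fun r => (List.range C).map (f r))

-- the per-cell value after the first k steps of A's fill loop (the step-k write wins over step-(k-1))
def pvCellK (hs : List Int) (maxH : Int) (k : Nat) (r c : Nat) : Char :=
  if c < k ∧ (r : Int) = maxH + 2 - PySem.Int.floordiv (hs.getD c 0) 3 then
    pvMark (hs.getD c 0)
  else if 1 ≤ c ∧ c - 1 < k ∧ (r : Int) = maxH - PySem.Int.floordiv (hs.getD (c - 1) 0) 3 then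
    pvMark (hs.getD (c - 1) 0)
  else ' '

theorem pvCumsum_length (acc : Int) (l : List Int) : (pvCumsum acc l).length = l.length := by
  induction l generalizing acc with
  | nil => rfl
  | cons d ds ih => simp [pvCumsum, ih]

theorem pvFd3_mono {a b : Int} (h : a ≤ b) :
    PySem.Int.floordiv a 3 ≤ PySem.Int.floordiv b 3 := by
  rw [PySem.Int.floordiv_eq_ediv_of_pos (by norm_num),
      PySem.Int.floordiv_eq_ediv_of_pos (by norm_num)]
  exact Int.ediv_le_ediv (by norm_num) h

theorem pv_set_map_range {α : Type} (g : Nat → α) (m j : Nat) (hj : j < m) (ch : α) :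
    ((List.range m).map g).set j ch = (List.range m).map (fun k => if k = j then ch else g k) := by
  apply List.ext_getElem (by simp)
  intro i h1 h2
  simp only [List.getElem_set, List.getElem_map, List.getElem_range]
  by_cases h : i = j
  · subst h; simp
  · simp [h, Ne.symm h]

theorem pvSet2_gridOf (R C : Nat) (f : Nat → Nat → Char) (y x : Int) (ch : Char)
    (hy0 : 0 ≤ y) (hyR : y < R) (hx0 : 0 ≤ x) (hxC : x < C) :
    pvSet2 (pvGridOf R C f) y x ch =
      pvGridOf R C (fun r c => if (r : Int) = y ∧ (c : Int) = x then ch else f r c) := by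
  obtain ⟨yn, rfl⟩ : ∃ yn : Nat, y = yn := ⟨y.toNat, (Int.toNat_of_nonneg hy0).symm⟩
  obtain ⟨xn, rfl⟩ : ∃ xn : Nat, x = xn := ⟨x.toNat, (Int.toNat_of_nonneg hx0).symm⟩
  have hyR' : yn < R := by exact_mod_cast hyR
  have hxC' : xn < C := by exact_mod_cast hxC
  unfold pvSet2 pvGridOf
  rw [PySem.List.pySetD_natCast, PySem.List.pySetD_natCast]
  have hget : PySem.List.pyGetD ((List.range R).map (fun r => (List.range C).map (f r))) (yn : Int) []
      = (List.range C).map (f yn) := by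
    rw [PySem.List.pyGetD_of_nonneg _ _ (by positivity)]
    simp [List.getD, hyR']
  rw [hget]
  rw [pv_set_map_range _ _ _ hxC', pv_set_map_range _ _ _ hyR']
  apply List.ext_getElem (by simp)
  intro i h1 h2
  simp only [List.getElem_map, List.getElem_range]
  by_cases h : i = yn
  · subst h; simp only [↓reduceIte]
    apply List.map_congr_left; intro c hc
    by_cases h2 : c = xn
    · subst h2; simp
    · simp [h2]
  · have : ¬ ((i:Int) = (yn:Int)) := fun hh => h (by exact_mod_cast hh)
    simp [h, this]

theorem pvGridOf_congr (R C : Nat) (f g : Nat → Nat → Char)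
    (h : ∀ r < R, ∀ c < C, f r c = g r c) : pvGridOf R C f = pvGridOf R C g := by
  unfold pvGridOf
  apply List.map_congr_left
  intro r hr
  apply List.map_congr_left
  intro c hc
  exact h r (List.mem_range.mp hr) c (List.mem_range.mp hc)

theorem pv_cell_step (hs : List Int) (maxH : Int) (k r c : Nat) (hk : k < hs.length) :
    (if (r : Int) = maxH + 2 - PySem.Int.floordiv (hs.getD k 0) 3 ∧ (c : Int) = 0 + (k : Int) then pvMark (hs.getD k 0)
     else if (r : Int) = maxH - PySem.Int.floordiv (hs.getD k 0) 3 ∧ (c : Int) = 1 + (k : Int) then pvMark (hs.getD k 0)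
     else pvCellK hs maxH k r c) = pvCellK hs maxH (k + 1) r c := by
  unfold pvCellK
  rcases Nat.lt_trichotomy c k with hc | hc | hc
  · rw [if_neg (fun hh : _ ∧ (c:Int) = 0 + (k:Int) => by omega),
        if_neg (fun hh : _ ∧ (c:Int) = 1 + (k:Int) => by omega)]
    by_cases hf : c < k ∧ (r : Int) = maxH + 2 - PySem.Int.floordiv (hs.getD c 0) 3
    · rw [if_pos hf, if_pos ⟨by omega, hf.2⟩]
    · rw [if_neg hf]
      by_cases hg : 1 ≤ c ∧ c - 1 < k ∧ (r : Int) = maxH - PySem.Int.floordiv (hs.getD (c - 1) 0) 3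
      · rw [if_pos hg, if_neg (fun hh => hf ⟨by omega, hh.2⟩), if_pos ⟨hg.1, by omega, hg.2.2⟩]
      · rw [if_neg hg, if_neg (fun hh => hf ⟨by omega, hh.2⟩),
            if_neg (fun hh => hg ⟨hh.1, by omega, hh.2.2⟩)]
  · subst hc
    rw [if_neg (fun hh : _ ∧ (c:Int) = 1 + (c:Int) => by omega)]
    by_cases h2 : (r : Int) = maxH + 2 - PySem.Int.floordiv (hs.getD c 0) 3
    · rw [if_pos ⟨h2, by omega⟩, if_pos ⟨by omega, h2⟩]
    · rw [if_neg (fun hh => h2 hh.1), if_neg (fun hh => absurd hh.1 (Nat.lt_irrefl c))]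
      by_cases hg : 1 ≤ c ∧ c - 1 < c ∧ (r : Int) = maxH - PySem.Int.floordiv (hs.getD (c - 1) 0) 3
      · rw [if_pos hg, if_neg (fun hh => h2 hh.2), if_pos ⟨hg.1, by omega, hg.2.2⟩]
      · rw [if_neg hg, if_neg (fun hh => h2 hh.2),
            if_neg (fun hh => hg ⟨hh.1, by omega, hh.2.2⟩)]
  · rw [if_neg (fun hh : _ ∧ (c:Int) = 0 + (k:Int) => by omega)]
    by_cases hc1 : c = k + 1
    · subst hc1
      have he : k + 1 - 1 = k := by omega
      by_cases h1 : (r : Int) = maxH - PySem.Int.floordiv (hs.getD k 0) 3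
      · rw [if_pos ⟨h1, by omega⟩, if_neg (fun hh => by omega),
            if_pos ⟨by omega, by omega, by rw [he]; exact h1⟩, he]
      · rw [if_neg (fun hh => h1 hh.1), if_neg (fun hh : k + 1 < k ∧ _ => by omega),
            if_neg (fun hh : 1 ≤ k + 1 ∧ k + 1 - 1 < k ∧ _ => by omega),
            if_neg (fun hh : k + 1 < k + 1 ∧ _ => by omega),
            if_neg (fun hh => h1 (by rw [he] at hh; exact hh.2.2))]
    · rw [if_neg (fun hh : _ ∧ (c:Int) = 1 + (k:Int) => by omega),
          if_neg (fun hh : c < k ∧ _ => by omega),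
          if_neg (fun hh : 1 ≤ c ∧ c - 1 < k ∧ _ => by omega),
          if_neg (fun hh : c < k + 1 ∧ _ => by omega),
          if_neg (fun hh : 1 ≤ c ∧ c - 1 < k + 1 ∧ _ => by omega)]

theorem pv_fill_invariant (hs : List Int) (maxH mn : Int)
    (hmax : ∀ z ∈ hs, PySem.Int.floordiv z 3 ≤ maxH)
    (hmin : ∀ z ∈ hs, mn ≤ PySem.Int.floordiv z 3)
    (R C : Nat) (hR : (R : Int) = maxH + 3 - mn) (hC : C = hs.length + 1)
    (k : Nat) (hk : k ≤ hs.length) :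
    (PySem.List.enumerate (hs.take k) 0).foldl
      (fun g p =>
        pvSet2 (pvSet2 g (maxH - PySem.Int.floordiv p.2 3) (1 + p.1) (pvMark p.2))
          (maxH + 2 - PySem.Int.floordiv p.2 3) (0 + p.1) (pvMark p.2))
      (pvGridOf R C (fun _ _ => ' '))
      = pvGridOf R C (pvCellK hs maxH k) := by
  induction k with
  | zero =>
    simp only [List.take_zero, PySem.List.enumerate_nil, List.foldl_nil]
    apply pvGridOf_congr
    intro r _ c _
    simp [pvCellK]
  | succ k ih =>
    have hklt : k < hs.length := by omega
    have htake : hs.take (k + 1) = hs.take k ++ [hs[k]] := by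
      rw [List.take_add_one, List.getElem?_eq_getElem hklt]; rfl
    have hlen : (hs.take k).length = k := by simp [hklt.le]
    rw [htake, PySem.List.enumerate_append, List.foldl_append, ih (by omega),
        hlen, PySem.List.enumerate_cons, PySem.List.enumerate_nil, List.foldl_cons, List.foldl_nil]
    dsimp only
    have hmem : hs[k] ∈ hs := List.getElem_mem hklt
    have hgd : hs.getD k 0 = hs[k] := List.getD_eq_getElem hs 0 hklt
    have h1 := hmax _ hmem
    have h2 := hmin _ hmem
    rw [pvSet2_gridOf _ _ _ _ _ _ (by omega) (by omega) (by omega) (by omega),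
        pvSet2_gridOf _ _ _ _ _ _ (by omega) (by omega) (by omega) (by omega)]
    apply pvGridOf_congr
    intro r hr c hc
    have := pv_cell_step hs maxH k r c hklt
    simp only [hgd] at this
    simpa using this

theorem pv_cell_eq_cellK (hs : List Int) (maxH : Int) (rn cn : Nat) (hc : cn < hs.length + 1) :
    pvCell hs maxH (hs.length : Int) (rn : Int) (cn : Int) = pvCellK hs maxH hs.length rn cn := by
  have hget : PySem.List.pyGetD hs (cn : Int) 0 = hs.getD cn 0 := by
    rw [PySem.List.pyGetD_of_nonneg _ _ (by positivity)]; simp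
  unfold pvCell pvCellK
  by_cases hc1 : 1 ≤ cn
  · have hcast : ((cn : Int) - 1) = ((cn - 1 : Nat) : Int) := by omega
    have hget' : PySem.List.pyGetD hs ((cn : Int) - 1) 0 = hs.getD (cn - 1) 0 := by
      rw [hcast, PySem.List.pyGetD_of_nonneg _ _ (by positivity)]; simp
    rw [hget, hget']
    by_cases h1 : cn < hs.length ∧ (rn : Int) = maxH + 2 - PySem.Int.floordiv (hs.getD cn 0) 3
    · rw [if_pos ⟨by exact_mod_cast h1.1, h1.2⟩, if_pos h1]
    · rw [if_neg (fun hh => h1 ⟨by exact_mod_cast hh.1, hh.2⟩), if_neg h1]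
      by_cases h2 : (rn : Int) = maxH - PySem.Int.floordiv (hs.getD (cn - 1) 0) 3
      · rw [if_pos ⟨by exact_mod_cast hc1, h2⟩, if_pos ⟨hc1, by omega, h2⟩]
      · rw [if_neg (fun hh => h2 hh.2), if_neg (fun hh => h2 hh.2.2)]
  · have hcn : cn = 0 := by omega
    subst hcn
    rw [hget]
    by_cases h1 : (0:Nat) < hs.length ∧ (rn : Int) = maxH + 2 - PySem.Int.floordiv (hs.getD 0 0) 3
    · rw [if_pos ⟨by exact_mod_cast h1.1, h1.2⟩, if_pos h1]
    · rw [if_neg (fun hh => h1 ⟨by exact_mod_cast hh.1, hh.2⟩), if_neg h1,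
          if_neg (fun hh : (1:Int) ≤ ((0:Nat):Int) ∧ _ => by omega),
          if_neg (fun hh : 1 ≤ (0:Nat) ∧ _ => by omega)]

-- ===== VERDICT (by name: the statement is the Claim_ definition above) =====
theorem draw_trail_spec : Claim_equal_draw_trail := by
  intro trail _ hpre
  simp only [Spec_draw_trail, draw_trail, draw_trail_alt]
  have htrne : pvCumsum 0 trail ≠ [] := by
    intro h
    have := pvCumsum_length 0 trail
    rw [h] at this
    exact hpre (List.length_eq_zero_iff.mp this.symm)
  obtain ⟨M, hM⟩ : ∃ M, PySem.List.max? (pvCumsum 0 trail) (fun x => x) = some M := by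
    cases h : PySem.List.max? (pvCumsum 0 trail) (fun x => x) with
    | none => exact absurd ((PySem.List.max?_eq_none_iff _ _).mp h) htrne
    | some M => exact ⟨M, rfl⟩
  obtain ⟨m, hm⟩ : ∃ m, PySem.List.min? (pvCumsum 0 trail) (fun x => x) = some m := by
    cases h : PySem.List.min? (pvCumsum 0 trail) (fun x => x) with
    | none => exact absurd ((PySem.List.min?_eq_none_iff _ _).mp h) htrne
    | some m => exact ⟨m, rfl⟩
  rw [hM, hm]
  simp only [Option.getD_some]
  set hs := pvCumsum 0 trail with hhs
  set maxH := PySem.Int.floordiv M 3 with hmaxH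
  set mn := PySem.Int.floordiv m 3 with hmn
  have hmM : mn ≤ maxH := by
    have hmem : m ∈ hs := PySem.List.min?_mem hm
    exact pvFd3_mono (PySem.List.max?_isMax hM m hmem)
  have hmax : ∀ z ∈ hs, PySem.Int.floordiv z 3 ≤ maxH :=
    fun z hz => pvFd3_mono (PySem.List.max?_isMax hM z hz)
  have hmin : ∀ z ∈ hs, mn ≤ PySem.Int.floordiv z 3 :=
    fun z hz => pvFd3_mono (PySem.List.min?_isMin hm z hz)
  set R := (maxH + 3 - mn).toNat with hRdef
  have hR : (R : Int) = maxH + 3 - mn := by omega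
  set C := hs.length + 1 with hCdef
  -- A's initial grid is the constant grid
  have hinit : List.replicate R (List.replicate C ' ') = pvGridOf R C (fun _ _ => ' ') := by
    unfold pvGridOf
    rw [List.map_const', List.length_range]
    congr 1
    rw [List.map_const', List.length_range]
  -- A's filled grid
  have hfill := pv_fill_invariant hs maxH mn hmax hmin R C hR rfl hs.length le_rfl
  rw [List.take_length] at hfill
  rw [hinit, hfill]
  -- B's side: turn the two pyRanges into List.range maps
  rw [PySem.List.pyRange_one, PySem.List.pyRange_one]
  simp only [sub_zero, List.map_map]
  have hRtn : (maxH + 3 - mn).toNat = R := rfl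
  have hCtn : ((hs.length : Int) + 1).toNat = C := by omega
  rw [hRtn, hCtn]
  congr 1
  unfold pvGridOf
  rw [List.map_map]
  apply List.map_congr_left
  intro r hr
  simp only [Function.comp]
  congr 1
  apply List.map_congr_left
  intro c hc
  simp only [Function.comp_apply, zero_add]
  exact (pv_cell_eq_cellK hs maxH r c (List.mem_range.mp hc)).symm
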